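-- pv_equiv track=rewrite | github.com/kevinpranata97/ai-agent | src/modules/planning_analysis.py | _parse_requirements
-- ===== SOURCE A (Python) =====
-- from typing import Dict, Any, List, Optional
--
-- def _parse_requirements(description: str) -> Dict[str, Any]:
--     """Parse requirements from natural language description."""
--     requirements = {
--         'functional': [],
--         'technical': [],
--         'constraints': [],
--         'keywords': []
--     }
--
--     # Extract keywords
--     keywords = description.lower().split()
--     requirements['keywords'] = keywords
--
--     # Identify functional requirements
--     if any(word in description.lower() for word in ['website', 'web', 'site']):
--         requirements['functional'].append('web_interface')
--
--     if any(word in description.lower() for word in ['api', 'backend', 'server']):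
--         requirements['functional'].append('backend_api')
--
--     if any(word in description.lower() for word in ['database', 'data', 'storage']):
--         requirements['functional'].append('data_storage')
--
--     if any(word in description.lower() for word in ['responsive', 'mobile']):
--         requirements['functional'].append('responsive_design')
--
--     # Identify technical requirements
--     if any(word in description.lower() for word in ['react', 'vue', 'angular']):
--         requirements['technical'].append('frontend_framework')
--
--     if any(word in description.lower() for word in ['python', 'flask', 'django']):
--         requirements['technical'].append('python_backend')
--
--     if any(word in description.lower() for word in ['deploy', 'hosting', 'cloud']):
--         requirements['technical'].append('deployment')
--
--     # Identify constraints
--     if any(word in description.lower() for word in ['fast', 'quick', 'urgent']):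
--         requirements['constraints'].append('time_sensitive')
--
--     if any(word in description.lower() for word in ['simple', 'basic', 'minimal']):
--         requirements['constraints'].append('minimal_complexity')
--
--     return requirements
-- ===== SOURCE B (Python) =====
-- _RULES = [
--     ("functional", "web_interface", ("website", "web", "site")),
--     ("functional", "backend_api", ("api", "backend", "server")),
--     ("functional", "data_storage", ("database", "data", "storage")),
--     ("functional", "responsive_design", ("responsive", "mobile")),
--     ("technical", "frontend_framework", ("react", "vue", "angular")),
--     ("technical", "python_backend", ("python", "flask", "django")),
--     ("technical", "deployment", ("deploy", "hosting", "cloud")),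
--     ("constraints", "time_sensitive", ("fast", "quick", "urgent")),
--     ("constraints", "minimal_complexity", ("simple", "basic", "minimal")),
-- ]
-- _ALL_KEYWORDS = [k for _, _, kws in _RULES for k in kws]
--
-- def _parse_requirements(description: str):
--     """Parse requirements from natural language description."""
--     desc = description.lower()
--     # One left-to-right scan over the text: at each position, record every
--     # rule keyword that starts there.  No per-keyword substring search.
--     found = set()
--     for i in range(len(desc)):
--         for kw in _ALL_KEYWORDS:
--             if desc.startswith(kw, i):
--                 found.add(kw)
--     requirements = {
--         'functional': [],
--         'technical': [],
--         'constraints': [],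
--         'keywords': desc.split(),
--     }
--     for cat, label, kws in _RULES:
--         if any(k in found for k in kws):
--             requirements[cat].append(label)
--     return requirements
-- ===== Notes on version B (the rewrite author's own statement) =====
-- stated objective: alternative
-- what changed: Instead of nine independent substring-containment searches, B makes a single left-to-right scan over the positions of the lowered text, collecting the set of rule keywords that start at each position, and then derives the category labels from a rule table by set membership.
import Mathlib
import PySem

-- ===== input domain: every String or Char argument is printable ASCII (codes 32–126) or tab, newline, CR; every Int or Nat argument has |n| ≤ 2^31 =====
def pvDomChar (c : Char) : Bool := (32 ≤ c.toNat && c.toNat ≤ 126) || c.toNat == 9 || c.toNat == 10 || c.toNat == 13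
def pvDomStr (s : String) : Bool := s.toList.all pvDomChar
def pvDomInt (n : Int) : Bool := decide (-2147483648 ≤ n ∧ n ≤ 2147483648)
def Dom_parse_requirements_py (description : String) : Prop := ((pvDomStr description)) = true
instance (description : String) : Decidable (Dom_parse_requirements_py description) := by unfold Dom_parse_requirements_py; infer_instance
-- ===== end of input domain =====

-- B replaces A's nine independent substring searches with one left-to-right scan over the
-- positions of the lowered text that collects the set of matched keywords, then derives the
-- labels from a rule table (objective: alternative algorithm, same cost class).

-- ===== PORT A =====
-- Literal port of A: dict of four empty lists, keywords overwrite, then nine ifs, each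
-- recomputing description.lower(), substring-testing ('in') and appending a label to its list.
def parse_requirements_py (description : String) : List (String × List String) :=
  let requirements : PySem.Dict String (List String) :=
    PySem.Dict.ofList [("functional", []), ("technical", []), ("constraints", []), ("keywords", [])]
  let keywords := PySem.Str.split₀ (PySem.Str.lower description)
  let requirements := requirements.insert "keywords" keywords
  let requirements := if ["website","web","site"].any (fun w => PySem.Str.isIn w (PySem.Str.lower description))
    then requirements.modify "functional" [] (fun l => l ++ ["web_interface"]) else requirements
  let requirements := if ["api","backend","server"].any (fun w => PySem.Str.isIn w (PySem.Str.lower description))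
    then requirements.modify "functional" [] (fun l => l ++ ["backend_api"]) else requirements
  let requirements := if ["database","data","storage"].any (fun w => PySem.Str.isIn w (PySem.Str.lower description))
    then requirements.modify "functional" [] (fun l => l ++ ["data_storage"]) else requirements
  let requirements := if ["responsive","mobile"].any (fun w => PySem.Str.isIn w (PySem.Str.lower description))
    then requirements.modify "functional" [] (fun l => l ++ ["responsive_design"]) else requirements
  let requirements := if ["react","vue","angular"].any (fun w => PySem.Str.isIn w (PySem.Str.lower description))
    then requirements.modify "technical" [] (fun l => l ++ ["frontend_framework"]) else requirements
  let requirements := if ["python","flask","django"].any (fun w => PySem.Str.isIn w (PySem.Str.lower description))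
    then requirements.modify "technical" [] (fun l => l ++ ["python_backend"]) else requirements
  let requirements := if ["deploy","hosting","cloud"].any (fun w => PySem.Str.isIn w (PySem.Str.lower description))
    then requirements.modify "technical" [] (fun l => l ++ ["deployment"]) else requirements
  let requirements := if ["fast","quick","urgent"].any (fun w => PySem.Str.isIn w (PySem.Str.lower description))
    then requirements.modify "constraints" [] (fun l => l ++ ["time_sensitive"]) else requirements
  let requirements := if ["simple","basic","minimal"].any (fun w => PySem.Str.isIn w (PySem.Str.lower description))
    then requirements.modify "constraints" [] (fun l => l ++ ["minimal_complexity"]) else requirements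
  requirements.items

-- ===== PORT B =====
-- B's rule table: (category, label, keywords), in A's textual order.
def pvRules : List (String × String × List String) :=
  [("functional","web_interface",["website","web","site"]),
   ("functional","backend_api",["api","backend","server"]),
   ("functional","data_storage",["database","data","storage"]),
   ("functional","responsive_design",["responsive","mobile"]),
   ("technical","frontend_framework",["react","vue","angular"]),
   ("technical","python_backend",["python","flask","django"]),
   ("technical","deployment",["deploy","hosting","cloud"]),
   ("constraints","time_sensitive",["fast","quick","urgent"]),
   ("constraints","minimal_complexity",["simple","basic","minimal"])]

-- _ALL_KEYWORDS = [k for _, _, kws in _RULES for k in kws]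
def pvAllKeywords : List String := pvRules.flatMap (fun r => r.2.2)

-- B's scanning loop: 'for i in range(len(desc)): for kw in _ALL_KEYWORDS: if desc.startswith(kw, i): found.add(kw)'.
-- desc.startswith(kw, i) with 0 ≤ i is exact as 'kw.toList <+: desc[i:]', i.e. Chars.startswith (drop i).
def pvScan (dl : List Char) : PySem.Set String :=
  (PySem.List.pyRange 0 (dl.length : Int) 1).foldl
    (fun f i => pvAllKeywords.foldl
      (fun f kw => if PySem.Chars.startswith (dl.drop i.toNat) kw.toList then PySem.Set.add f kw else f) f)
    PySem.Set.empty

-- Port of Source B: lower once, one position scan collecting the matched-keyword set, dict literal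
-- (keywords filled directly), then a loop over the rule table appending labels by set membership.
def parse_requirements_py_alt (description : String) : List (String × List String) :=
  let desc := PySem.Str.lower description
  let found := pvScan desc.toList
  let requirements : PySem.Dict String (List String) := PySem.Dict.ofList
    [("functional", []), ("technical", []), ("constraints", []), ("keywords", PySem.Str.split₀ desc)]
  let requirements := pvRules.foldl
    (fun d r => if r.2.2.any (fun k => PySem.Set.contains found k)
      then d.modify r.1 [] (fun l => l ++ [r.2.1]) else d)
    requirements
  requirements.items

-- ===== PRECONDITION & SPEC =====
def Spec_parse_requirements_py (description : String) (out : List (String × List String)) : Prop := out = parse_requirements_py_alt description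
instance (description : String) (out : List (String × List String)) : Decidable (Spec_parse_requirements_py description out) := by unfold Spec_parse_requirements_py; infer_instance

-- ===== CLAIM (what is proved, stated in full; the proofs are below) =====
def Claim_equal_parse_requirements_py : Prop := ∀ (description : String), Dom_parse_requirements_py description → Spec_parse_requirements_py description (parse_requirements_py description)

-- ===== LEMMAS AND PROOFS =====

-- A's dict always has exactly these four keys; pvMk names that shape.
def pvMk (L1 L2 L3 kw : List String) : PySem.Dict String (List String) :=
  PySem.Dict.ofList [("functional", L1), ("technical", L2), ("constraints", L3), ("keywords", kw)]

-- A hit: some keyword of ws occurs as a substring of description.lower().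
def pvHit (ws : List String) (d : String) : Bool := ws.any (fun w => PySem.Str.isIn w (PySem.Str.lower d))

-- Common closed form both programs are reduced to.
def pvSpecList (d : String) : List (String × List String) :=
  [("functional", (if pvHit ["website","web","site"] d then ["web_interface"] else []) ++
                  (if pvHit ["api","backend","server"] d then ["backend_api"] else []) ++
                  (if pvHit ["database","data","storage"] d then ["data_storage"] else []) ++
                  (if pvHit ["responsive","mobile"] d then ["responsive_design"] else [])),
   ("technical", (if pvHit ["react","vue","angular"] d then ["frontend_framework"] else []) ++
                 (if pvHit ["python","flask","django"] d then ["python_backend"] else []) ++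
                 (if pvHit ["deploy","hosting","cloud"] d then ["deployment"] else [])),
   ("constraints", (if pvHit ["fast","quick","urgent"] d then ["time_sensitive"] else []) ++
                   (if pvHit ["simple","basic","minimal"] d then ["minimal_complexity"] else [])),
   ("keywords", PySem.Str.split₀ (PySem.Str.lower d))]

lemma pvInit (kw : List String) :
    (PySem.Dict.ofList [("functional", ([] : List String)), ("technical", []), ("constraints", []), ("keywords", [])]).insert "keywords" kw
      = pvMk [] [] [] kw := rfl

lemma pvMod_fun (c : Bool) (L1 L2 L3 kw : List String) (lbl : String) :
    (if c = true then (pvMk L1 L2 L3 kw).modify "functional" [] (fun l => l ++ [lbl]) else pvMk L1 L2 L3 kw)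
      = pvMk (L1 ++ if c = true then [lbl] else []) L2 L3 kw := by
  cases c
  · simp [pvMk]
  · rfl

lemma pvMod_tech (c : Bool) (L1 L2 L3 kw : List String) (lbl : String) :
    (if c = true then (pvMk L1 L2 L3 kw).modify "technical" [] (fun l => l ++ [lbl]) else pvMk L1 L2 L3 kw)
      = pvMk L1 (L2 ++ if c = true then [lbl] else []) L3 kw := by
  cases c
  · simp [pvMk]
  · rfl

lemma pvMod_con (c : Bool) (L1 L2 L3 kw : List String) (lbl : String) :
    (if c = true then (pvMk L1 L2 L3 kw).modify "constraints" [] (fun l => l ++ [lbl]) else pvMk L1 L2 L3 kw)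
      = pvMk L1 L2 (L3 ++ if c = true then [lbl] else []) kw := by
  cases c
  · simp [pvMk]
  · rfl

lemma pvA (d : String) : parse_requirements_py d = pvSpecList d := by
  simp only [parse_requirements_py, pvInit, pvMod_fun, pvMod_tech, pvMod_con]
  simp only [pvSpecList, pvHit, pvMk, List.nil_append, List.append_assoc]
  rfl

-- Membership in the inner fold (one text position, all keywords).
lemma pvInnerMem (t : List Char) (L : List String) (f : PySem.Set String) (kw : String) :
    kw ∈ L.foldl (fun f kw' => if PySem.Chars.startswith t kw'.toList then PySem.Set.add f kw' else f) f
      ↔ kw ∈ f ∨ (kw ∈ L ∧ kw.toList <+: t) := by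
  induction L generalizing f with
  | nil => simp
  | cons a L ih =>
    simp only [List.foldl_cons, ih, List.mem_cons]
    by_cases h : PySem.Chars.startswith t a.toList = true
    · have ha : a.toList <+: t := (PySem.Chars.startswith_iff t a.toList).mp h
      simp only [h, if_true, PySem.Set.mem_add]
      constructor
      · rintro (( hf | rfl) | ⟨hm, hp⟩)
        · exact Or.inl hf
        · exact Or.inr ⟨Or.inl rfl, ha⟩
        · exact Or.inr ⟨Or.inr hm, hp⟩
      · rintro (hf | ⟨(rfl | hm), hp⟩)
        · exact Or.inl (Or.inl hf)
        · exact Or.inl (Or.inr rfl)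
        · exact Or.inr ⟨hm, hp⟩
    · simp only [h]
      constructor
      · rintro (hf | ⟨hm, hp⟩)
        · exact Or.inl hf
        · exact Or.inr ⟨Or.inr hm, hp⟩
      · rintro (hf | ⟨(rfl | hm), hp⟩)
        · exact Or.inl hf
        · exact absurd ((PySem.Chars.startswith_iff t kw.toList).mpr hp) h
        · exact Or.inr ⟨hm, hp⟩

-- Membership in the outer fold (all positions).
lemma pvOuterMem (dl : List Char) (I : List Int) (f : PySem.Set String) (kw : String) :
    kw ∈ I.foldl (fun f i => pvAllKeywords.foldl
        (fun f kw' => if PySem.Chars.startswith (dl.drop i.toNat) kw'.toList then PySem.Set.add f kw' else f) f) f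
      ↔ kw ∈ f ∨ (kw ∈ pvAllKeywords ∧ ∃ i ∈ I, kw.toList <+: dl.drop i.toNat) := by
  induction I generalizing f with
  | nil => simp
  | cons a I ih =>
    simp only [List.foldl_cons, ih, pvInnerMem, List.mem_cons]
    constructor
    · rintro ((hf | ⟨hm, hp⟩) | ⟨hm, i, hi, hp⟩)
      · exact Or.inl hf
      · exact Or.inr ⟨hm, a, Or.inl rfl, hp⟩
      · exact Or.inr ⟨hm, i, Or.inr hi, hp⟩
    · rintro (hf | ⟨hm, i, (rfl | hi), hp⟩)
      · exact Or.inl (Or.inl hf)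
      · exact Or.inl (Or.inr ⟨hm, hp⟩)
      · exact Or.inr ⟨hm, i, hi, hp⟩

-- The scan finds kw exactly when kw occurs as a substring ('kw in d'), for the (nonempty) rule keywords.
lemma pvContainsFound (d : String) (kw : String) (h1 : kw ∈ pvAllKeywords) :
    PySem.Set.contains (pvScan d.toList) kw = PySem.Str.isIn kw d := by
  have h2 : kw.toList ≠ [] := by
    simp only [pvAllKeywords, pvRules] at h1
    fin_cases h1 <;> decide
  rw [Bool.eq_iff_iff, PySem.Set.contains_iff]
  simp only [pvScan, pvOuterMem, PySem.Set.empty, List.not_mem_nil, false_or, h1, true_and]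
  rw [PySem.Str.isIn_eq, ← PySem.Chars.exists_prefix_drop_iff_isIn]
  constructor
  · rintro ⟨i, _, hp⟩
    exact ⟨i.toNat, hp⟩
  · rintro ⟨j, hp⟩
    have hj : j < d.toList.length := by
      by_contra hge
      rw [List.drop_eq_nil_of_le (by omega)] at hp
      exact h2 (List.prefix_nil.mp hp)
    refine ⟨(j : Int), ?_, by simpa using hp⟩
    rw [PySem.List.mem_pyRange_one]
    omega

-- Group form: 'any(k in found for k in ws)' is A's 'any(w in desc for w in ws)'.
lemma pvGroup (d : String) (ws : List String) (h : ∀ w ∈ ws, w ∈ pvAllKeywords) :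
    ws.any (fun k => PySem.Set.contains (pvScan (PySem.Str.lower d).toList) k)
      = pvHit ws d := by
  unfold pvHit
  exact PySem.List.any_congr_mem (fun w hw => pvContainsFound (PySem.Str.lower d) w (h w hw))

lemma pvB (d : String) : parse_requirements_py_alt d = pvSpecList d := by
  simp only [parse_requirements_py_alt, pvRules, List.foldl_cons, List.foldl_nil]
  rw [pvGroup d ["website","web","site"] (by decide),
      pvGroup d ["api","backend","server"] (by decide),
      pvGroup d ["database","data","storage"] (by decide),
      pvGroup d ["responsive","mobile"] (by decide),
      pvGroup d ["react","vue","angular"] (by decide),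
      pvGroup d ["python","flask","django"] (by decide),
      pvGroup d ["deploy","hosting","cloud"] (by decide),
      pvGroup d ["fast","quick","urgent"] (by decide),
      pvGroup d ["simple","basic","minimal"] (by decide)]
  have hinit : (PySem.Dict.ofList
      [("functional", ([] : List String)), ("technical", []), ("constraints", []),
       ("keywords", PySem.Str.split₀ (PySem.Str.lower d))])
      = pvMk [] [] [] (PySem.Str.split₀ (PySem.Str.lower d)) := rfl
  rw [hinit]
  simp only [pvMod_fun, pvMod_tech, pvMod_con]
  simp only [pvSpecList, pvMk, List.nil_append, List.append_assoc]
  rfl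

-- ===== VERDICT (by name: the statement is the Claim_ definition above) =====
theorem parse_requirements_py_spec : Claim_equal_parse_requirements_py := by
  intro d _
  exact (pvA d).trans (pvB d).symm
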